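-- pv_equiv track=rewrite | github.com/fraware/Occupational-Transition | scripts/qa_figureA8_lehd_benchmark.py | _is_contiguous_quarters
-- ===== SOURCE A (Python) =====
-- def _qtuple(q: str) -> tuple[int, int]:
--     y, qq = q.split("-Q")
--     return int(y), int(qq)
--
-- def _is_contiguous_quarters(vals: list[str]) -> bool:
--     if not vals:
--         return False
--     for i in range(1, len(vals)):
--         py, pq = _qtuple(vals[i - 1])
--         ny, nq = _qtuple(vals[i])
--         ey, eq = (py + 1, 1) if pq == 4 else (py, pq + 1)
--         if (ny, nq) != (ey, eq):
--             return False
--     return True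
-- ===== SOURCE B (Python) =====
-- def _qtuple(q: str) -> tuple[int, int]:
--     y, qq = q.split("-Q")
--     return int(y), int(qq)
--
-- def _is_contiguous_quarters(vals: list[str]) -> bool:
--     if not vals:
--         return False
--     if len(vals) == 1:
--         return True
--     ords = [4 * y + (q - 1) for y, q in map(_qtuple, vals)]
--     return ords == list(range(ords[0], ords[0] + len(ords)))
-- ===== Notes on version B (the rewrite author's own statement) =====
-- stated objective: alternative
-- what changed: Replaces the per-pair expected-(year,quarter)-tuple loop by encoding each quarter string to a single ordinal 4*y+(q-1) and comparing the whole ordinal list to the arithmetic sequence range(ords[0], ords[0]+len(ords)).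
-- outside the precondition, e.g. on _is_contiguous_quarters(['2000-Q8', '2001-Q5']): A returns False, B returns True; on _is_contiguous_quarters(['2000-Q1', '2000-Q3', 'x']): A returns False, B raises ValueError
import Mathlib
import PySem

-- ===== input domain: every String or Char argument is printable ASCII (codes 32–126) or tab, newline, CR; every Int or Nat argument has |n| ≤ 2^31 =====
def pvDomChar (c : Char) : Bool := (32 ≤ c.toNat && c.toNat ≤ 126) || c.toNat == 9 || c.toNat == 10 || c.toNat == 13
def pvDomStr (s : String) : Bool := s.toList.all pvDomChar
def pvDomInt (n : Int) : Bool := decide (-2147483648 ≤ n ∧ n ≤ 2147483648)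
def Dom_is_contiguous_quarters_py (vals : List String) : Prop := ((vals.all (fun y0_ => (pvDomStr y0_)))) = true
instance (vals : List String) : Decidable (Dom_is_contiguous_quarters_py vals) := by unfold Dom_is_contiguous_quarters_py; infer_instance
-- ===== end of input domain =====

-- B re-decides contiguity by encoding each quarter to the ordinal 4*y+(q-1) and comparing
-- the ordinal list to one arithmetic range, instead of A's per-pair expected-tuple loop.
-- Equivalence is about the return value.

-- _qtuple(q): q.split("-Q") into exactly two int-parseable pieces; none = Python raises
def qtuple? (q : String) : Option (Int × Int) :=
  match (PySem.Str.split? q "-Q").getD [] with   -- sep ≠ "", so split? is always some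
  | [y, qq] =>
    match PySem.Int.ofStr? y, PySem.Int.ofStr? qq with
    | some a, some b => some (a, b)
    | _, _ => none
  | _ => none

-- ===== PORT A =====
-- the for-loop over i in range(1, len(vals)): carries the previous string, re-parses it each step like A
def aGo : String → List String → Bool
  | _, [] => true
  | prev, cur :: rest =>
    match qtuple? prev, qtuple? cur with
    | some (py, pq), some (ny, nq) =>
      let e : Int × Int := if pq == 4 then (py + 1, 1) else (py, pq + 1)
      if (ny, nq) = e then aGo cur rest else false
    | _, _ => false   -- Python raises here; excluded by Pre_

def is_contiguous_quarters_py (vals : List String) : Bool :=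
  match vals with
  | [] => false
  | [_] => true      -- range(1,1) is empty: nothing parsed
  | v0 :: v1 :: rest => aGo v0 (v1 :: rest)

-- ===== PORT B =====
-- [4*y + (q-1) for y, q in map(_qtuple, vals)]; none if any parse fails (Python raises; excluded by Pre_)
def parseOrds : List String → Option (List Int)
  | [] => some []
  | v :: r =>
    match qtuple? v, parseOrds r with
    | some (y, q), some os => some ((4 * y + (q - 1)) :: os)
    | _, _ => none

def is_contiguous_quarters_py_alt (vals : List String) : Bool :=
  match vals with
  | [] => false
  | [_] => true
  | _ =>
    match parseOrds vals with
    | some ords =>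
      -- ords == list(range(ords[0], ords[0] + len(ords)))  (ords nonempty here)
      let o0 := ords.headD 0
      decide (ords = PySem.List.pyRange o0 (o0 + ords.length) 1)
    | none => false   -- Python raises here; excluded by Pre_

-- ===== PRECONDITION & SPEC =====
-- Pre_ excludes inputs on which _qtuple raises in either program (ValueError / unpack error),
-- and inputs containing a quarter number outside 1..4: those are not quarter strings, A's
-- tuple-wise comparison and B's ordinal encoding read such nonsense differently and neither
-- value is specified (see claim cites).
def Pre_is_contiguous_quarters_py (vals : List String) : Prop :=
  vals.length ≤ 1 ∨
    vals.all (fun v =>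
      match qtuple? v with
      | some (_, q) => decide (1 ≤ q ∧ q ≤ 4)
      | none => false) = true
instance (vals : List String) : Decidable (Pre_is_contiguous_quarters_py vals) := by
  unfold Pre_is_contiguous_quarters_py; infer_instance

def pvWitness_is_contiguous_quarters_py : List String := ["2020-Q4", "2021-Q1", "2021-Q2"]

def Spec_is_contiguous_quarters_py (vals : List String) (out : Bool) : Prop := out = is_contiguous_quarters_py_alt vals
instance (vals : List String) (out : Bool) : Decidable (Spec_is_contiguous_quarters_py vals out) := by
  unfold Spec_is_contiguous_quarters_py; infer_instance

-- ===== CLAIM (what is proved, stated in full; the proofs are below) =====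
def Claim_equal_is_contiguous_quarters_py : Prop := ∀ (vals : List String), Dom_is_contiguous_quarters_py vals → Pre_is_contiguous_quarters_py vals → Spec_is_contiguous_quarters_py vals (is_contiguous_quarters_py vals)

-- ===== LEMMAS AND PROOFS =====

def ordOf (p : Int × Int) : Int := 4 * p.1 + (p.2 - 1)

def inRangeQ (p : Int × Int) : Prop := 1 ≤ p.2 ∧ p.2 ≤ 4

-- A's step test equals an ordinal increment, for in-range quarters
lemma step_iff_ord (p q : Int × Int) (hp : inRangeQ p) (hq : inRangeQ q) :
    (q = (if p.2 == 4 then (p.1 + 1, 1) else (p.1, p.2 + 1))) ↔ ordOf q = ordOf p + 1 := by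
  obtain ⟨py, pq⟩ := p; obtain ⟨ny, nq⟩ := q
  obtain ⟨hp1, hp2⟩ := hp; obtain ⟨hq1, hq2⟩ := hq
  simp only at hp1 hp2 hq1 hq2
  by_cases h : pq = 4 <;>
    simp [h, ordOf, Prod.ext_iff] <;> constructor <;> intro hh <;> omega

-- chain over parsed pairs = A's loop
lemma aGo_chain (prev : String) (rest : List String) (p : Int × Int)
    (hp : qtuple? prev = some p) :
    aGo prev rest =
      (match rest with
       | [] => true
       | cur :: rest' =>
         match qtuple? cur with
         | some q =>
           (if (q.1, q.2) = (if p.2 == 4 then (p.1 + 1, 1) else (p.1, p.2 + 1)) then aGo cur rest' else false)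
         | none => false) := by
  cases rest with
  | nil => rfl
  | cons cur rest' =>
    obtain ⟨py, pq⟩ := p
    simp only [aGo, hp]
    cases hc : qtuple? cur with
    | none => rfl
    | some q => obtain ⟨ny, nq⟩ := q; rfl

-- ords of a contiguous consecutive range
lemma ords_consec (prev : String) (rest : List String) (p : Int × Int) (os : List Int)
    (hp : qtuple? prev = some p) (hps : parseOrds rest = some os)
    (hq : inRangeQ p)
    (hr : rest.all (fun v =>
      match qtuple? v with
      | some (_, q) => decide (1 ≤ q ∧ q ≤ 4)
      | none => false) = true) :
    aGo prev rest = decide (ordOf p :: os = PySem.List.pyRange (ordOf p) (ordOf p + (ordOf p :: os).length) 1) := by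
  induction rest generalizing prev p os with
  | nil =>
    simp only [parseOrds] at hps
    injection hps with hps; subst hps
    simp [aGo, PySem.List.pyRange_one_cons (show ordOf p < ordOf p + 1 by omega),
      PySem.List.pyRange_one_eq_nil (le_refl (ordOf p + 1))]
  | cons cur rest' ih =>
    simp only [parseOrds] at hps
    cases hc : qtuple? cur with
    | none => simp [hc] at hps
    | some q =>
      cases hrest : parseOrds rest' with
      | none => simp [hc, hrest] at hps
      | some os' =>
        obtain ⟨ny, nq⟩ := q
        simp only [hc, hrest] at hps
        injection hps with hps; subst hps
        simp only [List.all_cons, Bool.and_eq_true, hc] at hr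
        obtain ⟨hq', hr'⟩ := hr
        have hqin : inRangeQ (ny, nq) := by simpa [inRangeQ] using of_decide_eq_true hq'
        rw [aGo_chain prev (cur :: rest') p hp]
        have hord : ordOf (ny, nq) = 4 * ny + (nq - 1) := rfl
        by_cases hstep : ((ny, nq) : Int × Int) = (if p.2 == 4 then (p.1 + 1, 1) else (p.1, p.2 + 1))
        · have hone : ordOf (ny, nq) = ordOf p + 1 := (step_iff_ord p (ny, nq) hq hqin).mp hstep
          simp only [hc, hstep]
          rw [ih cur (ny, nq) os' hc hrest hqin hr']
          rw [PySem.List.pyRange_one_cons (show ordOf p < ordOf p + (ordOf p :: (4 * ny + (nq - 1)) :: os').length by simp; omega)]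
          simp only [hord] at hone
          have hlen : (ordOf p + ((ordOf p :: (4 * ny + (nq - 1)) :: os').length : Int)) =
              ordOf (ny, nq) + ((ordOf (ny, nq) :: os').length : Int) := by
            simp [hord]; omega
          rw [hlen, ← hone]
          simp [hord, hone]
        · have hne : ordOf (ny, nq) ≠ ordOf p + 1 := fun hh => hstep ((step_iff_ord p (ny, nq) hq hqin).mpr hh)
          simp only [hc, if_neg hstep]
          rw [PySem.List.pyRange_one_cons (show ordOf p < ordOf p + (ordOf p :: (4 * ny + (nq - 1)) :: os').length by simp; omega)]
          have : (4 * ny + (nq - 1)) ≠ ordOf p + 1 := by simpa [hord] using hne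
          rw [eq_comm]
          simp only [decide_eq_false_iff_not]
          intro hcontra
          have htl := (List.cons_eq_cons.mp hcontra).2
          rw [PySem.List.pyRange_one_cons (show ordOf p + 1 < ordOf p + ((ordOf p :: (4 * ny + (nq - 1)) :: os').length : Int) by simp)] at htl
          exact this (List.cons_eq_cons.mp htl).1

lemma parseOrds_isSome (l : List String)
    (h : l.all (fun v =>
      match qtuple? v with
      | some (_, q) => decide (1 ≤ q ∧ q ≤ 4)
      | none => false) = true) : (parseOrds l).isSome := by
  induction l with
  | nil => simp [parseOrds]
  | cons x xs ih =>
    simp only [List.all_cons, Bool.and_eq_true] at h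
    obtain ⟨hx, hxs⟩ := h
    cases hqx : qtuple? x with
    | none => rw [hqx] at hx; simp at hx
    | some px =>
      obtain ⟨yx, qx⟩ := px
      cases hxs' : parseOrds xs with
      | none => have := ih hxs; rw [hxs'] at this; simp at this
      | some os => simp [parseOrds, hqx, hxs']

-- ===== VERDICT (by name: the statement is the Claim_ definition above) =====
theorem is_contiguous_quarters_py_spec : Claim_equal_is_contiguous_quarters_py := by
  intro vals _ hpre
  unfold Spec_is_contiguous_quarters_py
  match vals with
  | [] => rfl
  | [v] => rfl
  | v0 :: v1 :: rest =>
    rcases hpre with h | h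
    · simp only [List.length_cons] at h; omega
    · simp only [List.all_cons, Bool.and_eq_true] at h
      obtain ⟨h0, h1, hr⟩ := h
      cases hq0 : qtuple? v0 with
      | none => rw [hq0] at h0; simp at h0
      | some p0 =>
      cases hq1 : qtuple? v1 with
      | none => rw [hq1] at h1; simp at h1
      | some p1 =>
      obtain ⟨y0, q0⟩ := p0; obtain ⟨y1, q1⟩ := p1
      rw [hq0] at h0; rw [hq1] at h1
      have hq0in : inRangeQ (y0, q0) := by simpa [inRangeQ] using of_decide_eq_true h0
      cases hrest : parseOrds rest with
      | none =>
        have := parseOrds_isSome rest hr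
        rw [hrest] at this; simp at this
      | some os =>
        have hparse1 : parseOrds (v1 :: rest) = some ((4 * y1 + (q1 - 1)) :: os) := by
          simp [parseOrds, hq1, hrest]
        have hparse : parseOrds (v0 :: v1 :: rest) = some ((4 * y0 + (q0 - 1)) :: (4 * y1 + (q1 - 1)) :: os) := by
          simp [parseOrds, hq0, hq1, hrest]
        have hall : (v1 :: rest).all (fun v =>
            match qtuple? v with
            | some (_, q) => decide (1 ≤ q ∧ q ≤ 4)
            | none => false) = true := by
          simp only [List.all_cons, Bool.and_eq_true, hq1]
          exact ⟨h1, hr⟩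
        have hA : is_contiguous_quarters_py (v0 :: v1 :: rest) = aGo v0 (v1 :: rest) := rfl
        rw [hA, ords_consec v0 (v1 :: rest) (y0, q0) ((4 * y1 + (q1 - 1)) :: os) hq0 hparse1 hq0in hall]
        simp only [is_contiguous_quarters_py_alt, hparse]
        rfl
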